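-- pv_equiv track=rewrite | github.com/suminjeff/baekjoon | 백준/Bronze/2846. 오르막길/오르막길.py | find_largest_climb_size
-- ===== SOURCE A (Python) =====
-- def find_largest_climb_size(n, heights):
--     max_climb_size = 0
--     current_start = None
--
--     for i in range(1, n):
--         if heights[i] > heights[i - 1]:
--             if current_start is None:
--                 current_start = heights[i - 1]
--         else:
--             if current_start is not None:
--                 max_climb_size = max(max_climb_size, heights[i - 1] - current_start)
--                 current_start = None
--
--     if current_start is not None:
--         max_climb_size = max(max_climb_size, heights[-1] - current_start)
--
--     return max_climb_size
-- ===== SOURCE B (Python) =====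
-- def find_largest_climb_size(n, heights):
--     max_climb = 0
--     current = 0
--     for i in range(1, n):
--         if heights[i] > heights[i - 1]:
--             current += heights[i] - heights[i - 1]
--             if current > max_climb:
--                 max_climb = current
--         else:
--             current = 0
--     return max_climb
-- ===== Notes on version B (the rewrite author's own statement) =====
-- stated objective: simpler
-- what changed: Replaced the segment-anchor state (Optional start height, climb closed on descent, plus a post-loop flush using heights[-1]) with a running accumulated-gain counter whose maximum is updated eagerly inside the loop, so there is no Option state and no post-loop step.
-- intended difference: When n < len(heights) and the step into index n-1 is uphill with heights[-1] != heights[n-1], A flushes the open climb with heights[-1] (an element beyond the first n it was asked to consider) while B returns the gain up to heights[n-1], the intended value for the first n heights. — e.g. on find_largest_climb_size(2, [0, 1, 5]): A returns 5, B returns 1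
import Mathlib
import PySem

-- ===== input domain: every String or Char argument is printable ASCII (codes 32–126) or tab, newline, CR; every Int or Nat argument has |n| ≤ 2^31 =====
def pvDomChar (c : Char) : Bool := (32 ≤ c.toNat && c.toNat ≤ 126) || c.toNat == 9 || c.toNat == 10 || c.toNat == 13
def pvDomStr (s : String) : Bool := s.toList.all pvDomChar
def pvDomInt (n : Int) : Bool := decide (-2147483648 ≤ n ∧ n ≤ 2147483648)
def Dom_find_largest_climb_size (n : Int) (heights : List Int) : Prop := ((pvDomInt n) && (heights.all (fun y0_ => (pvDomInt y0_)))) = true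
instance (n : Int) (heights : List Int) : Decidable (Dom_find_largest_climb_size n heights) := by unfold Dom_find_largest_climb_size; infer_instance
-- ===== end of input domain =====

-- B replaces A's segment-anchor state (start height + post-loop flush) by a running
-- accumulated-gain with an eagerly updated maximum; objective: simpler (no flush, no Option state).

-- ===== PORT A =====
-- A's loop body: state = (max_climb_size, current_start)
def pvStepA (heights : List Int) (st : Int × Option Int) (i : Int) : Int × Option Int :=
  if PySem.List.pyGetD heights i 0 > PySem.List.pyGetD heights (i - 1) 0 then
    match st.2 with
    | none => (st.1, some (PySem.List.pyGetD heights (i - 1) 0))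
    | some c => (st.1, some c)
  else
    match st.2 with
    | some c => (max st.1 (PySem.List.pyGetD heights (i - 1) 0 - c), none)
    | none => st

def find_largest_climb_size (n : Int) (heights : List Int) : Int :=
  let st := (PySem.List.pyRange 1 n 1).foldl (pvStepA heights) (0, none)
  match st.2 with
  | some c => max st.1 (PySem.List.pyGetD heights (-1) 0 - c)
  | none => st.1

-- ===== PORT B =====
-- B's loop body: state = (max_climb, current)
def pvStepB (heights : List Int) (st : Int × Int) (i : Int) : Int × Int :=
  if PySem.List.pyGetD heights i 0 > PySem.List.pyGetD heights (i - 1) 0 then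
    let cur := st.2 + (PySem.List.pyGetD heights i 0 - PySem.List.pyGetD heights (i - 1) 0)
    (if cur > st.1 then cur else st.1, cur)
  else
    (st.1, 0)

def find_largest_climb_size_alt (n : Int) (heights : List Int) : Int :=
  ((PySem.List.pyRange 1 n 1).foldl (pvStepB heights) (0, 0)).1

-- ===== PRECONDITION & SPEC =====
-- Pre_ excludes exactly the inputs where A raises IndexError: 2 ≤ n but n > len(heights).
def Pre_find_largest_climb_size (n : Int) (heights : List Int) : Prop :=
  n ≤ 1 ∨ n ≤ (heights.length : Int)
instance (n : Int) (heights : List Int) : Decidable (Pre_find_largest_climb_size n heights) := by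
  unfold Pre_find_largest_climb_size; infer_instance
def pvWitness_find_largest_climb_size : Int × List Int := (3, [1, 2, 1])

-- On inputs with n < len(heights) where the step into index n-1 is uphill and heights[-1] ≠ heights[n-1],
-- A flushes the open climb with heights[-1] (an element past the first n it was asked to consider),
-- while B returns the gain up to heights[n-1], the intended value for a run over the first n heights.
def D_find_largest_climb_size (n : Int) (heights : List Int) : Prop :=
  2 ≤ n ∧ n < (heights.length : Int) ∧
  PySem.List.pyGetD heights (n - 2) 0 < PySem.List.pyGetD heights (n - 1) 0 ∧
  PySem.List.pyGetD heights (-1) 0 ≠ PySem.List.pyGetD heights (n - 1) 0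
instance (n : Int) (heights : List Int) : Decidable (D_find_largest_climb_size n heights) := by
  unfold D_find_largest_climb_size; infer_instance

def Spec_find_largest_climb_size (n : Int) (heights : List Int) (out : Int) : Prop :=
  ¬ D_find_largest_climb_size n heights → out = find_largest_climb_size_alt n heights
instance (n : Int) (heights : List Int) (out : Int) : Decidable (Spec_find_largest_climb_size n heights out) := by
  unfold Spec_find_largest_climb_size; infer_instance

def pvDiffWitness_find_largest_climb_size : Int × List Int := (2, [0, 1, 5])
def pvDiffWitnessOut_find_largest_climb_size : Int × Int := (5, 1)

-- ===== CLAIM (what is proved, stated in full; the proofs are below) =====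
def Claim_unchanged_find_largest_climb_size : Prop := ∀ (n : Int) (heights : List Int), Dom_find_largest_climb_size n heights → Pre_find_largest_climb_size n heights → Spec_find_largest_climb_size n heights (find_largest_climb_size n heights)
def Claim_changed_find_largest_climb_size : Prop := Dom_find_largest_climb_size (pvDiffWitness_find_largest_climb_size.1) (pvDiffWitness_find_largest_climb_size.2) ∧ Pre_find_largest_climb_size (pvDiffWitness_find_largest_climb_size.1) (pvDiffWitness_find_largest_climb_size.2) ∧ D_find_largest_climb_size (pvDiffWitness_find_largest_climb_size.1) (pvDiffWitness_find_largest_climb_size.2) ∧ find_largest_climb_size (pvDiffWitness_find_largest_climb_size.1) (pvDiffWitness_find_largest_climb_size.2) = pvDiffWitnessOut_find_largest_climb_size.1 ∧ find_largest_climb_size_alt (pvDiffWitness_find_largest_climb_size.1) (pvDiffWitness_find_largest_climb_size.2) = pvDiffWitnessOut_find_largest_climb_size.2 ∧ pvDiffWitnessOut_find_largest_climb_size.1 ≠ pvDiffWitnessOut_find_largest_climb_size.2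

-- ===== LEMMAS AND PROOFS =====

-- The invariant tying A's (max, open start) state to B's (max, running gain) state after
-- the loop has processed indices 1 .. b-1.
def pvInv (heights : List Int) (b : Int) (sA : Int × Option Int) (sB : Int × Int) : Prop :=
  match sA.2 with
  | none => sB.1 = sA.1 ∧ sB.2 = 0
  | some c =>
      sB.1 = max sA.1 (PySem.List.pyGetD heights (b - 1) 0 - c) ∧
      sB.2 = PySem.List.pyGetD heights (b - 1) 0 - c ∧
      PySem.List.pyGetD heights (b - 2) 0 < PySem.List.pyGetD heights (b - 1) 0

theorem pvInv_step (heights : List Int) (b : Int) (sA : Int × Option Int) (sB : Int × Int)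
    (h : pvInv heights b sA sB) :
    pvInv heights (b + 1) (pvStepA heights sA b) (pvStepB heights sB b) := by
  obtain ⟨mA, csA⟩ := sA
  obtain ⟨mB, cur⟩ := sB
  have hidx : b + 1 - 1 = b := by ring
  have hidx2 : b + 1 - 2 = b - 1 := by ring
  cases csA with
  | none =>
      obtain ⟨h1, h2⟩ := h
      simp only at h1 h2
      subst h1 h2
      by_cases hgt : PySem.List.pyGetD heights b 0 > PySem.List.pyGetD heights (b - 1) 0
      · simp only [pvStepA, pvStepB, if_pos hgt, pvInv, hidx, hidx2]
        refine ⟨by omega, by omega, hgt⟩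
      · simp only [pvStepA, pvStepB, if_neg hgt, pvInv]
        exact ⟨trivial, trivial⟩
  | some c =>
      obtain ⟨h1, h2, h3⟩ := h
      simp only at h1 h2
      by_cases hgt : PySem.List.pyGetD heights b 0 > PySem.List.pyGetD heights (b - 1) 0
      · simp only [pvStepA, pvStepB, if_pos hgt, pvInv, hidx, hidx2]
        refine ⟨by rw [h1, h2]; omega, by rw [h2]; omega, hgt⟩
      · simp only [pvStepA, pvStepB, if_neg hgt, pvInv]
        exact ⟨by rw [h1], trivial⟩

theorem pvInv_fold (heights : List Int) (b : Int) (hb : 1 ≤ b) :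
    pvInv heights b
      ((PySem.List.pyRange 1 b 1).foldl (pvStepA heights) (0, none))
      ((PySem.List.pyRange 1 b 1).foldl (pvStepB heights) (0, 0)) := by
  induction b, hb using Int.le_induction with
  | base =>
      simp [PySem.List.pyRange_one_eq_nil (by omega : (1:Int) ≤ 1), pvInv]
  | succ b hb ih =>
      rw [PySem.List.pyRange_one_succ_right (by omega : (1:Int) ≤ b)]
      rw [List.foldl_append, List.foldl_append]
      simp only [List.foldl_cons, List.foldl_nil]
      exact pvInv_step heights b _ _ ih

-- heights[-1] = heights[len-1] (both via pyGetD) for a nonempty list.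
theorem pvGetD_neg_one_eq (heights : List Int) (h : heights ≠ []) :
    PySem.List.pyGetD heights (-1) 0 = PySem.List.pyGetD heights ((heights.length : Int) - 1) 0 := by
  have hl : 1 ≤ heights.length := by
    cases heights with
    | nil => exact absurd rfl h
    | cons a t => simp
  rw [PySem.List.pyGetD_neg_ofNat heights 1 0 (by omega) hl]
  have hcast : (heights.length : Int) - 1 = ((heights.length - 1 : Nat) : Int) := by omega
  rw [hcast, PySem.List.pyGetD_natCast]
  rw [List.getD_eq_getElem heights 0 (by omega)]

-- ===== VERDICT (by name: the statement is the Claim_ definition above) =====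
theorem find_largest_climb_size_spec : Claim_unchanged_find_largest_climb_size := by
  intro n heights _ hpre hnd
  unfold find_largest_climb_size find_largest_climb_size_alt
  by_cases hn : n ≤ 1
  · rw [PySem.List.pyRange_one_eq_nil hn]
    simp
  · have hn2 : 2 ≤ n := by omega
    have hlen : n ≤ (heights.length : Int) := by
      rcases hpre with h | h
      · omega
      · exact h
    have hinv := pvInv_fold heights n (by omega)
    set sA := (PySem.List.pyRange 1 n 1).foldl (pvStepA heights) (0, none) with hsA
    set sB := (PySem.List.pyRange 1 n 1).foldl (pvStepB heights) (0, 0) with hsB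
    unfold pvInv at hinv
    rcases h2 : sA.2 with _ | c
    · rw [h2] at hinv
      simp only [h2]
      exact hinv.1.symm
    · rw [h2] at hinv
      obtain ⟨h1, _, h3⟩ := hinv
      simp only [h2]
      have hne : heights ≠ [] := by
        intro he
        rw [he] at hlen
        simp at hlen
        omega
      have heq : PySem.List.pyGetD heights (-1) 0 = PySem.List.pyGetD heights (n - 1) 0 := by
        unfold D_find_largest_climb_size at hnd
        push Not at hnd
        by_cases hlt : n < (heights.length : Int)
        · exact hnd hn2 hlt h3
        · have : n = (heights.length : Int) := by omega
          rw [pvGetD_neg_one_eq heights hne, ← this]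
      rw [heq, h1]

theorem find_largest_climb_size_changed : Claim_changed_find_largest_climb_size := by
  unfold Claim_changed_find_largest_climb_size; decide
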